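-- pv_equiv track=rewrite | github.com/FranciscoVieir/Inventory-report | inventory_report/reports/complete_report.py | stock_products_by_company
-- ===== SOURCE A (Python) =====
-- def stock_products_by_company(file):
--     companies = {}
--     for item in file:
--         if item["nome_da_empresa"] in companies:
--             companies[item["nome_da_empresa"]] += 1
--         else:
--             companies[item["nome_da_empresa"]] = 1
--     return companies
-- ===== SOURCE B (Python) =====
-- def stock_products_by_company(file):
--     names = [item["nome_da_empresa"] for item in file]
--     return {name: names.count(name) for name in dict.fromkeys(names)}
-- ===== Notes on version B (the rewrite author's own statement) =====
-- stated objective: simpler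
-- what changed: Replaces the incremental membership-test/update counter loop with a distinct-names pass (dict.fromkeys) followed by a per-name count over the extracted name list, built as a dict comprehension.
import Mathlib
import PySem

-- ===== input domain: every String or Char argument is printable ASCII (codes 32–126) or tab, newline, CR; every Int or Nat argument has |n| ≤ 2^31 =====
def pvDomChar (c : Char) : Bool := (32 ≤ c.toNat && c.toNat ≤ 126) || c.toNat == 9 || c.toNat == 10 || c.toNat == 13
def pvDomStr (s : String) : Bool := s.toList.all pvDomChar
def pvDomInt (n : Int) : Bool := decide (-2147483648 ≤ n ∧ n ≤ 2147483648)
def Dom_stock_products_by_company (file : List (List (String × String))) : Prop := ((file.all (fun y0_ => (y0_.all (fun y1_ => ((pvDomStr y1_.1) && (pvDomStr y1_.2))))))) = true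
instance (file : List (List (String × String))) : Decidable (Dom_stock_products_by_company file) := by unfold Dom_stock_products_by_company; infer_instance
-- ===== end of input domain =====

-- B replaces A's incremental membership-test counter loop with a distinct-names pass plus
-- a per-name counting scan; objective: simpler (a one-line dict comprehension).

-- item["nome_da_empresa"] (shared field lookup; none = KeyError, excluded by Pre_)
def pvGetName (item : List (String × String)) : Option String :=
  (PySem.Dict.ofList item).get? "nome_da_empresa"

-- ===== PORT A =====
def stock_products_by_company (file : List (List (String × String))) : List (String × Int) :=
  (file.foldl (fun (companies : PySem.Dict String Int) item =>
      match pvGetName item with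
      | some name =>
        if companies.contains name then companies.modify name 0 (· + 1)
        else companies.insert name 1
      | none => companies) PySem.Dict.empty).items

-- ===== PORT B =====
def stock_products_by_company_alt (file : List (List (String × String))) : List (String × Int) :=
  let names := file.filterMap pvGetName
  (PySem.List.dedup names).map (fun name => (name, (PySem.List.count names name : Int)))

-- ===== PRECONDITION & SPEC =====
-- Pre_ excludes exactly the items lacking the "nome_da_empresa" field, where Python A raises KeyError.
def Pre_stock_products_by_company (file : List (List (String × String))) : Prop :=
  ∀ item ∈ file, "nome_da_empresa" ∈ item.map Prod.fst
instance (file : List (List (String × String))) : Decidable (Pre_stock_products_by_company file) := by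
  unfold Pre_stock_products_by_company; infer_instance

def pvWitness_stock_products_by_company : (List (List (String × String))) :=
  [[("nome_da_empresa", "Acme"), ("produto", "p1")], [("nome_da_empresa", "Acme")]]

def Spec_stock_products_by_company (file : List (List (String × String))) (out : List (String × Int)) : Prop := out = stock_products_by_company_alt file
instance (file : List (List (String × String))) (out : List (String × Int)) : Decidable (Spec_stock_products_by_company file out) := by unfold Spec_stock_products_by_company; infer_instance

-- ===== CLAIM (what is proved, stated in full; the proofs are below) =====
def Claim_equal_stock_products_by_company : Prop := ∀ (file : List (List (String × String))), Dom_stock_products_by_company file → Pre_stock_products_by_company file → Spec_stock_products_by_company file (stock_products_by_company file)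

-- ===== LEMMAS AND PROOFS =====

-- a key listed among an item's keys is found by the dict lookup
theorem pvGetName_isSome (item : List (String × String))
    (h : "nome_da_empresa" ∈ item.map Prod.fst) : (pvGetName item).isSome := by
  rw [pvGetName, ← PySem.Dict.contains_eq_isSome_get?, PySem.Dict.ofList]
  suffices H : ∀ (ps : List (String × String)) (d : PySem.Dict String String) (k : String),
      k ∈ ps.map Prod.fst ∨ d.contains k →
      (PySem.Dict.update d ps).contains k = true by
    exact H item _ _ (Or.inl h)
  intro ps
  induction ps with
  | nil => intro d k h; simp [PySem.Dict.update] at *; tauto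
  | cons p t ih =>
    intro d k h
    show (PySem.Dict.update (d.insert p.1 p.2) t).contains k = true
    apply ih
    rcases h with h | h
    · simp at h
      rcases h with h | h
      · right; rw [PySem.Dict.contains_insert]; simp [h]
      · left; simpa using h
    · right; rw [PySem.Dict.contains_insert]; simp [h]

theorem pvGetD_of_not_contains (d : PySem.Dict String Int) (k : String)
    (h : d.contains k = false) : d.getD k 0 = 0 := by
  simp [PySem.Dict.getD, PySem.Dict.get?, PySem.Dict.contains] at *
  rw [List.find?_eq_none.mpr]
  · rfl
  · rintro ⟨a, b⟩ hab
    simpa using h a b hab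

-- A's loop body IS the Counter step
theorem pvStep_eq (d : PySem.Dict String Int) (k : String) :
    (if d.contains k then d.modify k 0 (· + 1) else d.insert k 1) = d.modify k 0 (· + 1) := by
  by_cases h : d.contains k = true
  · simp [h]
  · simp only [Bool.not_eq_true] at h
    simp [h, PySem.Dict.modify, pvGetD_of_not_contains d k h]

-- under Pre_, A's fold over the file is the Counter fold over the extracted names
theorem pvFold_eq (file : List (List (String × String)))
    (hp : ∀ item ∈ file, "nome_da_empresa" ∈ item.map Prod.fst) (d : PySem.Dict String Int) :
    file.foldl (fun companies item =>
      match pvGetName item with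
      | some name =>
        if companies.contains name then companies.modify name 0 (· + 1)
        else companies.insert name 1
      | none => companies) d
    = (file.filterMap pvGetName).foldl (fun d x => d.modify x 0 (· + 1)) d := by
  induction file generalizing d with
  | nil => rfl
  | cons item t ih =>
    obtain ⟨name, hn⟩ := Option.isSome_iff_exists.mp
      (pvGetName_isSome item (hp item (List.mem_cons_self)))
    simp only [List.foldl_cons, List.filterMap_cons, hn]
    rw [pvStep_eq]
    exact ih (fun i hi => hp i (List.mem_cons_of_mem _ hi)) _

-- ===== VERDICT (by name: the statement is the Claim_ definition above) =====
theorem stock_products_by_company_spec : Claim_equal_stock_products_by_company := by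
  intro file _ hp
  unfold Spec_stock_products_by_company stock_products_by_company stock_products_by_company_alt
  rw [pvFold_eq file hp]
  have : (file.filterMap pvGetName).foldl (fun d x => d.modify x 0 (· + 1)) PySem.Dict.empty
      = PySem.Dict.counter (file.filterMap pvGetName) := rfl
  rw [this, PySem.Dict.items_counter]
  simp only [PySem.List.dedup_eq_ofList, PySem.List.count_eq]
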